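-- pv_equiv track=rewrite | github.com/tupkalenkodi/db_spark | python_scripts/generate.py | decode_graph6
-- ===== SOURCE A (Python) =====
-- def decode_graph6(graph6_str: str):
--     n = ord(graph6_str[0]) - 63
--     s = graph6_str[1:]
--     total_bits = n * (n - 1) // 2
--
--     all_bits = []
--     for ch in s:
--         c = ord(ch) - 63
--         all_bits.extend([(c >> (5 - i)) & 1 for i in range(6)])
--
--     bits = all_bits[:total_bits]
--     edges = []
--     bit_idx = 0
--
--     for j in range(1, n):
--         for i in range(j):
--             if bit_idx < len(bits):
--                 if bits[bit_idx] == 1: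
--                     edges.append([int(i), int(j)])
--             else:
--                 break
--             bit_idx += 1
--         if bit_idx >= len(bits):
--             break
--
--     return edges
-- ===== SOURCE B (Python) =====
-- def decode_graph6(graph6_str: str):
--     # single fused pass: walk the upper-triangular positions while reading bits
--     n = ord(graph6_str[0]) - 63
--     edges = []
--     i, j = 0, 1
--     for ch in graph6_str[1:]:
--         c = ord(ch) - 63
--         for k in range(6):
--             if j >= n:
--                 return edges
--             if ((c >> (5 - k)) & 1) == 1:
--                 edges.append([i, j])
--             if i + 1 == j:
--                 i, j = 0, j + 1
--             else:
--                 i += 1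
--     return edges
-- ===== Notes on version B (the rewrite author's own statement) =====
-- stated objective: faster
-- what changed: B replaces A's two-phase build (full 6*len(s) bit table, truncation to total_bits, then nested j/i range loops indexing the table) with a single fused pass over the characters that maintains a running upper-triangular position (i,j), appends [i,j] on a 1-bit, and returns as soon as j reaches n, never materialising the bit or pair tables.
import Mathlib
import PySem

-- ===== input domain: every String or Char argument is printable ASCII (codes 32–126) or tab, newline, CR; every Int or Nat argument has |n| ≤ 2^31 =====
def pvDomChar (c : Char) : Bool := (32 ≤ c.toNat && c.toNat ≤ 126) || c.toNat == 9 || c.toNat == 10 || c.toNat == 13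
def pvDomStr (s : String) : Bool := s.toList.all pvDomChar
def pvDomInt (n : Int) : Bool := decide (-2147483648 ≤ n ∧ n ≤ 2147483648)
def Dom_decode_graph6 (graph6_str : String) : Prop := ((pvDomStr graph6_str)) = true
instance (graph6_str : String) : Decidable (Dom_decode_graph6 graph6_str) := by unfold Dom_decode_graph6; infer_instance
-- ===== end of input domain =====

-- B is a single fused pass over the characters keeping a running (i,j) position,
-- instead of A's bit-table build + truncation + nested range loops; return value only.

-- shared helper: ((c >> (5 - k)) & 1), exactly as both Pythons compute one bit
def pvBit (c k : Int) : Int := PySem.Int.band (c >>> (5 - k).toNat) 1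

-- ===== PORT A =====
-- inner 'for i in range(j)' loop: returns (edges, bit_idx); break = stop
def decodeInner (bits : List Int) (j : Int) : List Int → List (List Int) → Int → (List (List Int) × Int)
  | [], edges, idx => (edges, idx)
  | i :: rest, edges, idx =>
    if idx < (bits.length : Int) then
      decodeInner bits j rest
        (if PySem.List.pyGetD bits idx 0 = 1 then edges ++ [[i, j]] else edges) (idx + 1)
    else (edges, idx)

-- outer 'for j in range(1, n)' loop with its break check
def decodeOuter (bits : List Int) : List Int → List (List Int) → Int → List (List Int)
  | [], edges, _ => edges
  | j :: rest, edges, idx =>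
    match decodeInner bits j (PySem.List.pyRange 0 j 1) edges idx with
    | (edges', idx') => if (bits.length : Int) ≤ idx' then edges' else decodeOuter bits rest edges' idx'

def decode_graph6 (graph6_str : String) : List (List Int) :=
  match PySem.Str.pyGet? graph6_str 0 with
  | none => []   -- IndexError on the empty string: excluded by Pre_
  | some ch0 =>
    let n : Int := (ch0.toNat : Int) - 63
    let s := PySem.List.slice graph6_str.toList (some 1) none
    let total_bits := PySem.Int.floordiv (n * (n - 1)) 2
    let all_bits := s.foldl (fun acc ch =>
      acc ++ (PySem.List.pyRange 0 6 1).map (fun i => pvBit ((ch.toNat : Int) - 63) i)) []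
    let bits := PySem.List.slice all_bits none (some total_bits)
    decodeOuter bits (PySem.List.pyRange 1 n 1) [] 0

-- ===== PORT B =====
-- inner 'for k in range(6)': state (edges, i, j, returned?)
def altInner (n c : Int) : List Int → List (List Int) → Int → Int → (List (List Int) × Int × Int × Bool)
  | [], edges, i, j => (edges, i, j, false)
  | k :: rest, edges, i, j =>
    if n ≤ j then (edges, i, j, true)
    else
      let edges' := if pvBit c k = 1 then edges ++ [[i, j]] else edges
      if i + 1 = j then altInner n c rest edges' 0 (j + 1)
      else altInner n c rest edges' (i + 1) j

def altOuter (n : Int) : List Char → List (List Int) → Int → Int → List (List Int)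
  | [], edges, _, _ => edges
  | ch :: rest, edges, i, j =>
    match altInner n ((ch.toNat : Int) - 63) (PySem.List.pyRange 0 6 1) edges i j with
    | (edges', i', j', done) => if done then edges' else altOuter n rest edges' i' j'

def decode_graph6_alt (graph6_str : String) : List (List Int) :=
  match PySem.Str.pyGet? graph6_str 0 with
  | none => []   -- IndexError on the empty string: excluded by Pre_
  | some ch0 =>
    altOuter ((ch0.toNat : Int) - 63) (PySem.List.slice graph6_str.toList (some 1) none) [] 0 1

-- ===== PRECONDITION & SPEC =====
-- A raises IndexError exactly on the empty string (graph6_str[0]); Pre_ excludes it.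
def Pre_decode_graph6 (graph6_str : String) : Prop := graph6_str.toList ≠ []
instance (graph6_str : String) : Decidable (Pre_decode_graph6 graph6_str) := by
  unfold Pre_decode_graph6; infer_instance
def pvWitness_decode_graph6 : String := "DQc"

def Spec_decode_graph6 (graph6_str : String) (out : List (List Int)) : Prop := out = decode_graph6_alt graph6_str
instance (graph6_str : String) (out : List (List Int)) : Decidable (Spec_decode_graph6 graph6_str out) := by unfold Spec_decode_graph6; infer_instance

-- ===== CLAIM (what is proved, stated in full; the proofs are below) =====
def Claim_equal_decode_graph6 : Prop := ∀ (graph6_str : String), Dom_decode_graph6 graph6_str → Pre_decode_graph6 graph6_str → Spec_decode_graph6 graph6_str (decode_graph6 graph6_str)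

-- ===== LEMMAS AND PROOFS =====

-- common normal form: emit one edge per 1-bit, pairs zipped with bits (truncating)
def pvEmit : List (Int × Int) → List Int → List (List Int)
  | p :: ps, b :: bs => (if b = 1 then [[p.1, p.2]] else []) ++ pvEmit ps bs
  | _, _ => []

def pvRow (j : Int) : List (Int × Int) := (PySem.List.pyRange 0 j 1).map (fun i => (i, j))

def pvPairsFrom (n i j : Int) : List (Int × Int) :=
  if j < n then
    (PySem.List.pyRange i j 1).map (fun a => (a, j)) ++ (PySem.List.pyRange (j + 1) n 1).flatMap pvRow
  else []

def pvStep (i j : Int) : Int × Int := if i + 1 = j then (0, j + 1) else (i + 1, j)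

-- B's bit-consumer in normal form
def pvRun (n : Int) : List Int → Int → Int → List (List Int)
  | [], _, _ => []
  | b :: bs, i, j =>
    if n ≤ j then []
    else (if b = 1 then [[i, j]] else []) ++ pvRun n bs (pvStep i j).1 (pvStep i j).2

def pvWalk (n : Int) : List Int → Int × Int → Int × Int
  | [], p => p
  | _ :: bs, (i, j) => if n ≤ j then (i, j) else pvWalk n bs (pvStep i j)

theorem pvEmit_nil_left (bs : List Int) : pvEmit [] bs = [] := by
  cases bs <;> rfl

theorem pvEmit_nil_right (ps : List (Int × Int)) : pvEmit ps [] = [] := by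
  cases ps <;> rfl

theorem pvEmit_append (ps qs : List (Int × Int)) (bs : List Int) :
    pvEmit (ps ++ qs) bs = pvEmit ps bs ++ pvEmit qs (bs.drop ps.length) := by
  induction ps generalizing bs with
  | nil => simp [pvEmit_nil_left]
  | cons p ps ih =>
    cases bs with
    | nil => simp [pvEmit_nil_right]
    | cons b bs => simp [pvEmit, ih, List.append_assoc]

theorem pvEmit_take (ps : List (Int × Int)) (bs : List Int) (k : Nat) (h : ps.length ≤ k) :
    pvEmit ps (bs.take k) = pvEmit ps bs := by
  induction ps generalizing bs k with
  | nil => simp [pvEmit_nil_left]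
  | cons p ps ih =>
    cases bs with
    | nil => simp
    | cons b bs =>
      cases k with
      | zero => simp at h
      | succ k =>
        simp only [List.take_succ_cons, pvEmit]
        rw [ih bs k (by simp at h; omega)]

theorem decodeInner_spec (bits : List Int) (j : Int) (il : List Int) (edges : List (List Int))
    (idx : Int) (h0 : 0 ≤ idx) :
    decodeInner bits j il edges idx =
      (edges ++ pvEmit (il.map (fun i => (i, j))) (bits.drop idx.toNat),
       idx + (min il.length (bits.length - idx.toNat) : Nat)) := by
  induction il generalizing edges idx with
  | nil => simp [decodeInner, pvEmit_nil_left]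
  | cons i rest ih =>
    by_cases hlt : idx < (bits.length : Int)
    · have hx : idx.toNat < bits.length := by omega
      have hdrop : bits.drop idx.toNat = bits[idx.toNat] :: bits.drop (idx.toNat + 1) :=
        (List.getElem_cons_drop hx).symm
      have hget : PySem.List.pyGetD bits idx 0 = bits[idx.toNat] :=
        PySem.List.pyGetD_eq_getElem bits 0 h0 hlt
      rw [decodeInner, if_pos hlt, ih _ _ (by omega)]
      rw [List.map_cons, hdrop, pvEmit, hget]
      have ht : (idx + 1).toNat = idx.toNat + 1 := by omega
      rw [Prod.mk.injEq]
      refine ⟨?_, ?_⟩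
      · rw [ht]; by_cases hb : bits[idx.toNat] = 1 <;> simp [hb, List.append_assoc]
      · simp only [List.length_cons]; omega
    · rw [decodeInner, if_neg hlt]
      have hdrop : bits.drop idx.toNat = [] := List.drop_eq_nil_of_le (by omega)
      rw [hdrop, pvEmit_nil_right]
      have hz : bits.length - idx.toNat = 0 := by omega
      simp [hz]

theorem decodeOuter_spec (bits : List Int) (jl : List Int) (edges : List (List Int))
    (idx : Int) (h0 : 0 ≤ idx) :
    decodeOuter bits jl edges idx =
      edges ++ pvEmit (jl.flatMap pvRow) (bits.drop idx.toNat) := by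
  induction jl generalizing edges idx with
  | nil => simp [decodeOuter, pvEmit_nil_left]
  | cons j rest ih =>
    rw [decodeOuter, decodeInner_spec bits j _ edges idx h0]
    dsimp only
    have hrow : (PySem.List.pyRange 0 j 1).map (fun i => (i, j)) = pvRow j := rfl
    rw [hrow]
    set L := (PySem.List.pyRange 0 j 1).length with hL
    have hrowlen : (pvRow j).length = L := by rw [pvRow, List.length_map]
    set m := bits.length - idx.toNat with hm
    by_cases hbrk : (bits.length : Int) ≤ idx + (min L m : Nat)
    · rw [if_pos hbrk, List.flatMap_cons, pvEmit_append, hrowlen]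
      have hnil : (bits.drop idx.toNat).drop L = [] := by
        rw [List.drop_drop]; exact List.drop_eq_nil_of_le (by omega)
      rw [hnil, pvEmit_nil_right, List.append_nil]
    · rw [if_neg hbrk, ih _ _ (by omega)]
      have ht : (idx + (min L m : Nat)).toNat = idx.toNat + L := by omega
      rw [ht, List.flatMap_cons, pvEmit_append, hrowlen, List.drop_drop, List.append_assoc]

theorem pvRun_stop (n : Int) (bs : List Int) (i j : Int) (h : n ≤ j) : pvRun n bs i j = [] := by
  cases bs with
  | nil => rfl
  | cons b bs => rw [pvRun, if_pos h]

theorem pvRun_append (n : Int) (xs ys : List Int) (i j : Int) :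
    pvRun n (xs ++ ys) i j =
      pvRun n xs i j ++ pvRun n ys (pvWalk n xs (i, j)).1 (pvWalk n xs (i, j)).2 := by
  induction xs generalizing i j with
  | nil => simp [pvRun, pvWalk]
  | cons x xs ih =>
    by_cases h : n ≤ j
    · simp only [List.cons_append, pvRun, pvWalk, if_pos h]
      rw [pvRun_stop n ys i j h]; rfl
    · simp only [List.cons_append, pvRun, pvWalk, if_neg h]
      rw [ih, List.append_assoc]

theorem altInner_spec (n c : Int) (kl : List Int) (edges : List (List Int)) (i j : Int) :
    (altInner n c kl edges i j).1 = edges ++ pvRun n (kl.map (pvBit c)) i j ∧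
    ((altInner n c kl edges i j).2.1, (altInner n c kl edges i j).2.2.1)
      = pvWalk n (kl.map (pvBit c)) (i, j) ∧
    ((altInner n c kl edges i j).2.2.2 = true → n ≤ (altInner n c kl edges i j).2.2.1) := by
  induction kl generalizing edges i j with
  | nil => simp [altInner, pvRun, pvWalk]
  | cons k rest ih =>
    by_cases h : n ≤ j
    · simp [altInner, pvRun, pvWalk, h]
    · by_cases hb : pvBit c k = 1 <;> by_cases hs : i + 1 = j <;>
        simp [altInner, pvRun, pvWalk, pvStep, h, hb, hs, ih, List.append_assoc] <;>
        exact (ih _ _ _).2.2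

theorem altOuter_spec (n : Int) (chs : List Char) (edges : List (List Int)) (i j : Int) :
    altOuter n chs edges i j =
      edges ++ pvRun n (chs.flatMap (fun ch => (PySem.List.pyRange 0 6 1).map (pvBit ((ch.toNat : Int) - 63)))) i j := by
  induction chs generalizing edges i j with
  | nil => simp [altOuter, pvRun]
  | cons ch rest ih =>
    rw [altOuter]
    set bs6 := (PySem.List.pyRange 0 6 1).map (pvBit ((ch.toNat : Int) - 63)) with hbs6
    obtain ⟨h1, h2, h3⟩ := altInner_spec n ((ch.toNat : Int) - 63) (PySem.List.pyRange 0 6 1) edges i j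
    rcases hr : altInner n ((ch.toNat : Int) - 63) (PySem.List.pyRange 0 6 1) edges i j with ⟨e', i', j', d⟩
    rw [hr] at h1 h2 h3
    simp only at h1 h2 h3
    dsimp only
    have hw1 : (pvWalk n bs6 (i, j)).1 = i' := by rw [← h2]
    have hw2 : (pvWalk n bs6 (i, j)).2 = j' := by rw [← h2]
    rw [List.flatMap_cons, pvRun_append, h1, hw1, hw2]
    cases d with
    | false =>
      simp only [Bool.false_eq_true, if_false]
      rw [ih, List.append_assoc]
    | true =>
      simp only [if_true]
      rw [pvRun_stop _ _ _ _ (h3 rfl), List.append_nil]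

theorem pvRun_eq_emit (n : Int) (bs : List Int) (i j : Int) (h0 : 0 ≤ i) (hij : i < j) :
    pvRun n bs i j = pvEmit (pvPairsFrom n i j) bs := by
  induction bs generalizing i j with
  | nil => simp [pvRun, pvEmit_nil_right]
  | cons b bs ih =>
    by_cases h : n ≤ j
    · rw [pvRun, if_pos h, pvPairsFrom, if_neg (by omega), pvEmit_nil_left]
    · have hjn : j < n := by omega
      have hcons : pvPairsFrom n i j =
          (i, j) :: (if i + 1 = j then pvPairsFrom n 0 (j + 1) else pvPairsFrom n (i + 1) j) := by
        rw [pvPairsFrom, if_pos hjn, PySem.List.pyRange_one_cons hij, List.map_cons]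
        by_cases hs : i + 1 = j
        · rw [if_pos hs, hs, PySem.List.pyRange_one_eq_nil (le_refl j), List.map_nil, List.singleton_append]
          congr 1
          rw [pvPairsFrom]
          by_cases h2 : j + 1 < n
          · rw [if_pos h2, PySem.List.pyRange_one_cons h2, List.flatMap_cons]
            rfl
          · rw [if_neg h2, PySem.List.pyRange_one_eq_nil (by omega), List.flatMap_nil]
        · rw [if_neg hs, pvPairsFrom, if_pos hjn]; rfl
      rw [pvRun, if_neg h, hcons, pvEmit]
      by_cases hs : i + 1 = j
      · have hstep : pvStep i j = (0, j + 1) := by simp [pvStep, hs]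
        rw [hstep, if_pos hs]
        exact congrArg _ (ih 0 (j + 1) (le_refl 0) (by omega))
      · have hstep : pvStep i j = (i + 1, j) := by simp [pvStep, hs]
        rw [hstep, if_neg hs]
        exact congrArg _ (ih (i + 1) j (by omega) (by omega))

theorem pairs_eq_pairsFrom (n : Int) :
    (PySem.List.pyRange 1 n 1).flatMap pvRow = pvPairsFrom n 0 1 := by
  by_cases h : 1 < n
  · rw [pvPairsFrom, if_pos h, PySem.List.pyRange_one_cons h, List.flatMap_cons]
    rfl
  · rw [pvPairsFrom, if_neg h, PySem.List.pyRange_one_eq_nil (by omega), List.flatMap_nil]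

theorem tb_nonneg (n : Int) : 0 ≤ PySem.Int.floordiv (n * (n - 1)) 2 := by
  have h : 0 ≤ n * (n - 1) := by
    by_cases h : n ≤ 0
    · nlinarith
    · nlinarith
  rw [PySem.Int.floordiv_eq_ediv_of_pos (by norm_num)]
  exact Int.ediv_nonneg h (by norm_num)

theorem pairs_length (n : Int) :
    ((PySem.List.pyRange 1 n 1).flatMap pvRow).length ≤ (PySem.Int.floordiv (n * (n - 1)) 2).toNat := by
  by_cases hn : n ≤ 1
  · rw [PySem.List.pyRange_one_eq_nil hn, List.flatMap_nil]
    simp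
  · have hmain : ∀ m : Int, 1 ≤ m →
        ((((PySem.List.pyRange 1 m 1).flatMap pvRow).length : Int)) = PySem.Int.floordiv (m * (m - 1)) 2 := by
      intro m hm
      induction m, hm using Int.le_induction with
      | base =>
        rw [PySem.List.pyRange_one_eq_nil (le_refl 1), List.flatMap_nil]
        decide
      | succ m hm ihm =>
        rw [PySem.List.pyRange_one_succ_right hm, List.flatMap_append, List.flatMap_cons,
          List.flatMap_nil, List.append_nil, List.length_append]
        have hrl : (pvRow m).length = m.toNat := by
          simp [pvRow, PySem.List.length_pyRange_one]
        have h2 : PySem.Int.floordiv ((m + 1) * (m + 1 - 1)) 2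
            = PySem.Int.floordiv (m * (m - 1)) 2 + m := by
          rw [PySem.Int.floordiv_eq_ediv_of_pos (by norm_num),
            PySem.Int.floordiv_eq_ediv_of_pos (by norm_num)]
          have hmul : (m + 1) * (m + 1 - 1) = m * (m - 1) + m * 2 := by ring
          rw [hmul, Int.add_mul_ediv_right _ _ (by norm_num)]
        rw [hrl, h2, ← ihm]
        push_cast
        omega
    have h1 := hmain n (by omega)
    have h0 := tb_nonneg n
    omega

-- ===== VERDICT (by name: the statement is the Claim_ definition above) =====
theorem decode_graph6_spec : Claim_equal_decode_graph6 := by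
  unfold Claim_equal_decode_graph6
  intro s _ hpre
  unfold Pre_decode_graph6 at hpre
  unfold Spec_decode_graph6
  rcases hcs : s.toList with _ | ⟨c0, cs⟩
  · exact absurd hcs hpre
  · have hget : PySem.Str.pyGet? s 0 = some c0 := by simp [pysem, hcs]
    unfold decode_graph6 decode_graph6_alt
    rw [hget, hcs]
    dsimp only
    have hslice : PySem.List.slice (c0 :: cs) (some 1) none = cs := by
      rw [PySem.List.slice_from_one]
      rfl
    rw [hslice, PySem.List.foldl_append_eq_flatMap, List.nil_append,
      PySem.List.slice_to _ (tb_nonneg _),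
      decodeOuter_spec _ _ _ 0 (le_refl 0), List.nil_append, Int.toNat_zero, List.drop_zero,
      altOuter_spec, List.nil_append,
      pvEmit_take _ _ _ (pairs_length _), pairs_eq_pairsFrom,
      ← pvRun_eq_emit _ _ 0 1 (le_refl 0) (by norm_num)]
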